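-- pv_equiv track=rewrite | github.com/sandeep0428/Custom-Payload-Encoder | evasion_test.py | signature_detection
-- ===== SOURCE A (Python) =====
-- def signature_detection(payload):
--
--     signatures = [
--         "cmd.exe",
--         "powershell",
--         "wget",
--         "nc",
--         "bash",
--         "whoami"
--     ]
--
--     for sig in signatures:
--         if sig.lower() in payload.lower():
--             return "DETECTED"
--
--     return "BYPASSED"
-- ===== SOURCE B (Python) =====
-- def signature_detection(payload):
--     signatures = ("cmd.exe", "powershell", "wget", "nc", "bash", "whoami")
--     p = payload.lower()
--     for i in range(len(p) + 1):
--         if any(p.startswith(s, i) for s in signatures):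
--             return "DETECTED"
--     return "BYPASSED"
-- ===== Notes on version B (the rewrite author's own statement) =====
-- stated objective: alternative
-- what changed: B makes a single left-to-right scan over the lowercased payload, testing at each position whether any signature starts there, instead of A's loop over signatures with a separate full substring search per signature.
import Mathlib
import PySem

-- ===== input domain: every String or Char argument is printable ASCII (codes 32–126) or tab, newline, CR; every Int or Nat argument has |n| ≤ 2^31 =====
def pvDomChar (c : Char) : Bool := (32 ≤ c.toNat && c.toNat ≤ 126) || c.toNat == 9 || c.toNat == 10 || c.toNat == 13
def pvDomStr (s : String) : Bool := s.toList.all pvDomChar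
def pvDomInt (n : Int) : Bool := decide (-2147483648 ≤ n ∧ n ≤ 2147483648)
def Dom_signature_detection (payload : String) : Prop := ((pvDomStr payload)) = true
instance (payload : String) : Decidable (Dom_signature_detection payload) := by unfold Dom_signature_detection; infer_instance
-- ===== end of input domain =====

-- B replaces A's per-signature substring searches by one left-to-right scan of the
-- lowercased payload, testing at each position whether any signature starts there
-- (objective: alternative; same result proved equal).

-- ===== PORT A =====
-- the literal signature list of A
def pvSigsA : List String := ["cmd.exe", "powershell", "wget", "nc", "bash", "whoami"]

-- A's loop: for sig in signatures: if sig.lower() in payload.lower(): return "DETECTED"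
def pvSigLoopA : List String → String → String
  | [], _ => "BYPASSED"
  | sig :: rest, payload =>
      if PySem.Str.isIn (PySem.Str.lower sig) (PySem.Str.lower payload) then "DETECTED"
      else pvSigLoopA rest payload

def signature_detection (payload : String) : String :=
  pvSigLoopA pvSigsA payload

-- ===== PORT B =====
-- B's signature tuple (already lowercase literals, as in Source B)
def pvSigsB : List (List Char) :=
  ["cmd.exe".toList, "powershell".toList, "wget".toList, "nc".toList, "bash".toList, "whoami".toList]

-- B's scan: for i in range(len(p)+1): if any(p.startswith(s, i) for s in signatures): return "DETECTED"
-- (each suffix of p corresponds to one start position i)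
def pvScanB (sigs : List (List Char)) : List Char → Bool
  | [] => sigs.any (fun s => s.isPrefixOf [])
  | c :: rest => sigs.any (fun s => s.isPrefixOf (c :: rest)) || pvScanB sigs rest

def signature_detection_alt (payload : String) : String :=
  if pvScanB pvSigsB (PySem.Str.lower payload).toList then "DETECTED" else "BYPASSED"

-- ===== PRECONDITION & SPEC =====
def Spec_signature_detection (payload : String) (out : String) : Prop := out = signature_detection_alt payload
instance (payload : String) (out : String) : Decidable (Spec_signature_detection payload out) := by unfold Spec_signature_detection; infer_instance

-- ===== CLAIM (what is proved, stated in full; the proofs are below) =====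
def Claim_equal_signature_detection : Prop := ∀ (payload : String), Dom_signature_detection payload → Spec_signature_detection payload (signature_detection payload)

-- ===== LEMMAS AND PROOFS =====

-- B's scan finds exactly the signatures that occur as an infix
lemma pvScanB_iff (sigs : List (List Char)) (cs : List Char) :
    pvScanB sigs cs = true ↔ ∃ s ∈ sigs, s <:+: cs := by
  induction cs with
  | nil =>
      simp [pvScanB, List.any_eq_true, List.isPrefixOf_iff_prefix]
  | cons c rest ih =>
      simp only [pvScanB, Bool.or_eq_true, List.any_eq_true,
        List.isPrefixOf_iff_prefix, ih]
      constructor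
      · rintro (⟨s, hs, hp⟩ | ⟨s, hs, hi⟩)
        · exact ⟨s, hs, hp.isInfix⟩
        · exact ⟨s, hs, hi.trans (List.infix_cons_iff.mpr (Or.inr List.infix_rfl))⟩
      · rintro ⟨s, hs, hi⟩
        rcases List.infix_cons_iff.mp hi with hp | hi'
        · exact Or.inl ⟨s, hs, hp⟩
        · exact Or.inr ⟨s, hs, hi'⟩

-- A's loop returns "DETECTED" iff some signature's lowercase form is in the lowered payload
lemma pvSigLoopA_iff (sigs : List String) (payload : String) :
    pvSigLoopA sigs payload =
      (if ∃ s ∈ sigs, PySem.Str.isIn (PySem.Str.lower s) (PySem.Str.lower payload) = true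
       then "DETECTED" else "BYPASSED") := by
  induction sigs with
  | nil => simp [pvSigLoopA]
  | cons s rest ih =>
      simp only [pvSigLoopA, ih]
      by_cases h : PySem.Str.isIn (PySem.Str.lower s) (PySem.Str.lower payload) = true
      · rw [if_pos h, if_pos ⟨s, List.mem_cons_self .., h⟩]
      · rw [if_neg h]
        by_cases h2 : ∃ t ∈ rest, PySem.Str.isIn (PySem.Str.lower t) (PySem.Str.lower payload) = true
        · rw [if_pos h2, if_pos (by obtain ⟨t, ht, hh⟩ := h2; exact ⟨t, List.mem_cons_of_mem _ ht, hh⟩)]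
        · rw [if_neg h2, if_neg (by
            rintro ⟨t, ht, hh⟩
            rcases List.mem_cons.mp ht with rfl | ht'
            · exact h hh
            · exact h2 ⟨t, ht', hh⟩)]

theorem signature_detection_spec : Claim_equal_signature_detection := by
  intro payload _
  unfold Spec_signature_detection signature_detection signature_detection_alt
  rw [pvSigLoopA_iff]
  have hmain :
      (∃ s ∈ pvSigsA, PySem.Str.isIn (PySem.Str.lower s) (PySem.Str.lower payload) = true)
        ↔ pvScanB pvSigsB (PySem.Str.lower payload).toList = true := by
    rw [pvScanB_iff]
    constructor
    · rintro ⟨s, hs, hin⟩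
      refine ⟨(PySem.Str.lower s).toList, ?_, (PySem.Str.isIn_iff_infix _ _).mp hin⟩
      fin_cases hs <;> decide
    · rintro ⟨t, ht, hi⟩
      fin_cases ht
      · exact ⟨"cmd.exe", by decide, (PySem.Str.isIn_iff_infix _ _).mpr (by simpa using hi)⟩
      · exact ⟨"powershell", by decide, (PySem.Str.isIn_iff_infix _ _).mpr (by simpa using hi)⟩
      · exact ⟨"wget", by decide, (PySem.Str.isIn_iff_infix _ _).mpr (by simpa using hi)⟩
      · exact ⟨"nc", by decide, (PySem.Str.isIn_iff_infix _ _).mpr (by simpa using hi)⟩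
      · exact ⟨"bash", by decide, (PySem.Str.isIn_iff_infix _ _).mpr (by simpa using hi)⟩
      · exact ⟨"whoami", by decide, (PySem.Str.isIn_iff_infix _ _).mpr (by simpa using hi)⟩
  by_cases h : pvScanB pvSigsB (PySem.Str.lower payload).toList = true
  · rw [if_pos (hmain.mpr h), if_pos h]
  · rw [if_neg (fun hc => h (hmain.mp hc)), if_neg h]
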